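-- pv_equiv track=rewrite | github.com/cadia-lvl/samromur-tools | PrepMetadataFile/create_new_splits.py | get_general_stats
-- ===== SOURCE A (Python) =====
-- from collections import Counter
--
-- def get_general_stats(data:list):
--     '''
--     Makes some basic stats to help us verify
--     that this is working.
--     data: id, spk_id, sentece
--     '''
--     output= '\n============STATS===========\n'
--     s, spk = [], []
--     for line in data:
--
--         spk.append(line[1])
--         s.append(line[2])
--
--     output += f"There are {len(set(spk))} unique speakers\n"
--     output += "The frequenzy is a follows:\n"
--     for k, v in Counter(sorted(Counter(spk).values())).items():
--         output += f"{v}\tspekers have {k} occurences\n"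
--
--     output += f"There are {len(set(s))} unique sentences\n"
--     output += "The frequenzy is a follows:\n"
--     for k, v in Counter(sorted(Counter(s).values())).items():
--         output += f"{v}\t senteces appear {k} time/s\n"
--     output += f""
--
--     return output
-- ===== SOURCE B (Python) =====
-- def get_general_stats(data: list):
--     '''
--     Same stats via a sort + run-length-encoding pipeline instead of Counters:
--     each column is sorted, maximal runs of equal values give the per-key
--     occurrence counts, and run-length encoding the sorted counts gives the
--     frequency distribution in ascending order.
--     '''
--     output = '\n============STATS===========\n'
--     spk = sorted(line[1] for line in data)
--     s = sorted(line[2] for line in data)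
--
--     spk_runs = _runs(spk)
--     output += f"There are {len(spk_runs)} unique speakers\n"
--     output += "The frequenzy is a follows:\n"
--     for k, v in _runs(sorted(n for _, n in spk_runs)):
--         output += f"{v}\tspekers have {k} occurences\n"
--
--     s_runs = _runs(s)
--     output += f"There are {len(s_runs)} unique sentences\n"
--     output += "The frequenzy is a follows:\n"
--     for k, v in _runs(sorted(n for _, n in s_runs)):
--         output += f"{v}\t senteces appear {k} time/s\n"
--     return output
--
--
-- def _runs(xs):
--     '''Run-length encode a sorted list: one (value, run length) pair per maximal run.'''
--     runs = []
--     i = 0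
--     while i < len(xs):
--         j = i
--         while j < len(xs) and xs[j] == xs[i]:
--             j += 1
--         runs.append((xs[i], j - i))
--         i = j
--     return runs
-- ===== Notes on version B (the rewrite author's own statement) =====
-- stated objective: alternative
-- what changed: Replaces the Counter-based pipeline (Counter(column) then Counter(sorted(values))) with a sort + run-length-encoding pipeline: each column is sorted, an index scan over maximal runs of equal values yields the per-key counts, and run-length encoding the sorted counts yields the ascending frequency distribution; no Counter or hash map is used.
import Mathlib
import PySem

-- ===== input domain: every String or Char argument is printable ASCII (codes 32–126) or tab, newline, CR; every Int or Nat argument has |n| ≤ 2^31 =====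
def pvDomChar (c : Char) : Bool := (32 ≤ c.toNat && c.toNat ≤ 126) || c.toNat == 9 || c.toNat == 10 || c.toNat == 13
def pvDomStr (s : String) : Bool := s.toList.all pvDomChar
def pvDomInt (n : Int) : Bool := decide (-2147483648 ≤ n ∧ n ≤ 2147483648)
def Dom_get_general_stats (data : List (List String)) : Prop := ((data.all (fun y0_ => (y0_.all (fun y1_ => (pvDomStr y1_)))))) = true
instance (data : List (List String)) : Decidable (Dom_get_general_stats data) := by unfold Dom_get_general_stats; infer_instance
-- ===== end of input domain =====

-- B replaces the Counter pipeline by sort + run-length encoding (index scan over maximal runs); objective: alternative.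

-- ===== PORT A =====
def get_general_stats (data : List (List String)) : String :=
  let output := "\n============STATS===========\n"
  let s_spk := data.foldl
    (fun (acc : List String × List String) line =>
      (acc.1 ++ [PySem.List.pyGetD line 2 ""], acc.2 ++ [PySem.List.pyGetD line 1 ""]))
    ([], [])
  let s := s_spk.1
  let spk := s_spk.2
  let output := output ++ "There are " ++ PySem.Int.toStr ((PySem.Set.ofList spk).length : Int) ++ " unique speakers\n"
  let output := output ++ "The frequenzy is a follows:\n"
  let output := (PySem.Dict.counter (PySem.List.sorted (PySem.Dict.counter spk).values (fun v => v) false)).items.foldl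
    (fun out kv => out ++ PySem.Int.toStr kv.2 ++ "\tspekers have " ++ PySem.Int.toStr kv.1 ++ " occurences\n")
    output
  let output := output ++ "There are " ++ PySem.Int.toStr ((PySem.Set.ofList s).length : Int) ++ " unique sentences\n"
  let output := output ++ "The frequenzy is a follows:\n"
  let output := (PySem.Dict.counter (PySem.List.sorted (PySem.Dict.counter s).values (fun v => v) false)).items.foldl
    (fun out kv => out ++ PySem.Int.toStr kv.2 ++ "\t senteces appear " ++ PySem.Int.toStr kv.1 ++ " time/s\n")
    output
  output ++ ""

-- ===== PORT B =====
-- _runs: the outer while over i, the inner while being the length of the matching prefix from i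
def pvRuns {α : Type} [BEq α] [LawfulBEq α] (xs : List α) (i : Nat) : List (α × Int) :=
  if h : i < xs.length then
    let j := i + ((xs.drop i).takeWhile (fun y => y == xs[i])).length
    (xs[i], ((j - i : Nat) : Int)) :: pvRuns xs j
  else []
  termination_by xs.length - i
  decreasing_by
    have hd : xs.drop i = xs[i] :: xs.drop (i + 1) := List.drop_eq_getElem_cons h
    have : 1 ≤ ((xs.drop i).takeWhile (fun y => y == xs[i])).length := by
      rw [hd]; simp [List.takeWhile]
    omega

def get_general_stats_alt (data : List (List String)) : String :=
  let output := "\n============STATS===========\n"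
  let spk := PySem.List.sorted (data.map (fun line => PySem.List.pyGetD line 1 "")) (fun x => x) false
  let s := PySem.List.sorted (data.map (fun line => PySem.List.pyGetD line 2 "")) (fun x => x) false
  let spk_runs := pvRuns spk 0
  let output := output ++ "There are " ++ PySem.Int.toStr (spk_runs.length : Int) ++ " unique speakers\n"
  let output := output ++ "The frequenzy is a follows:\n"
  let output := (pvRuns (PySem.List.sorted (spk_runs.map Prod.snd) (fun x => x) false) 0).foldl
    (fun out kv => out ++ PySem.Int.toStr kv.2 ++ "\tspekers have " ++ PySem.Int.toStr kv.1 ++ " occurences\n")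
    output
  let s_runs := pvRuns s 0
  let output := output ++ "There are " ++ PySem.Int.toStr (s_runs.length : Int) ++ " unique sentences\n"
  let output := output ++ "The frequenzy is a follows:\n"
  let output := (pvRuns (PySem.List.sorted (s_runs.map Prod.snd) (fun x => x) false) 0).foldl
    (fun out kv => out ++ PySem.Int.toStr kv.2 ++ "\t senteces appear " ++ PySem.Int.toStr kv.1 ++ " time/s\n")
    output
  output

-- ===== PRECONDITION & SPEC =====
-- Pre_ excludes lines with fewer than 3 fields, on which the Python A raises IndexError (line[1] / line[2]).
def Pre_get_general_stats (data : List (List String)) : Prop := ∀ line ∈ data, 3 ≤ line.length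
instance (data : List (List String)) : Decidable (Pre_get_general_stats data) := by unfold Pre_get_general_stats; infer_instance
def pvWitness_get_general_stats : List (List String) := [["1", "spk1", "hello"], ["2", "spk1", "world"]]

def Spec_get_general_stats (data : List (List String)) (out : String) : Prop := out = get_general_stats_alt data
instance (data : List (List String)) (out : String) : Decidable (Spec_get_general_stats data out) := by unfold Spec_get_general_stats; infer_instance

-- ===== CLAIM (what is proved, stated in full; the proofs are below) =====
def Claim_equal_get_general_stats : Prop := ∀ (data : List (List String)), Dom_get_general_stats data → Pre_get_general_stats data → Spec_get_general_stats data (get_general_stats data)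

-- ===== LEMMAS AND PROOFS =====

-- structural reformulation of the run-length scan
def pvRunsRec {α : Type} [BEq α] : List α → List (α × Int)
  | [] => []
  | x :: t =>
    (x, ((1 + (t.takeWhile (fun y => y == x)).length : Nat) : Int)) ::
      pvRunsRec (t.drop (t.takeWhile (fun y => y == x)).length)
  termination_by l => l.length
  decreasing_by simp

theorem pvRuns_eq_rec {α : Type} [BEq α] [LawfulBEq α] (xs : List α) (i : Nat) :
    pvRuns xs i = pvRunsRec (xs.drop i) := by
  fun_induction pvRuns xs i with
  | case1 i h j ih =>
    have hd : xs.drop i = xs[i] :: xs.drop (i + 1) := List.drop_eq_getElem_cons h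
    rw [hd, pvRunsRec]
    have htw : (xs.drop i).takeWhile (fun y => y == xs[i])
        = xs[i] :: (xs.drop (i+1)).takeWhile (fun y => y == xs[i]) := by
      rw [hd]; simp [List.takeWhile]
    simp only [j, htw, List.length_cons] at *
    rw [ih]
    have h1 : i + ((List.takeWhile (fun y => y == xs[i]) (List.drop (i + 1) xs)).length + 1) - i
        = 1 + (List.takeWhile (fun y => y == xs[i]) (List.drop (i + 1) xs)).length := by omega
    have h2 : List.drop (i + ((List.takeWhile (fun y => y == xs[i]) (List.drop (i + 1) xs)).length + 1)) xs
        = List.drop (List.takeWhile (fun y => y == xs[i]) (List.drop (i + 1) xs)).length (List.drop (i + 1) xs) := by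
      rw [List.drop_drop]
      congr 1
      omega
    rw [h1, h2]
  | case2 i h =>
    simp at h
    rw [List.drop_eq_nil_of_le h, pvRunsRec]


theorem pv_foldl_add_of_subset {α : Type} [BEq α] [LawfulBEq α] (run : List α) :
    ∀ s : List α, (∀ a ∈ run, a ∈ s) → run.foldl PySem.Set.add s = s := by
  induction run with
  | nil => intro s _; rfl
  | cons a t ih =>
    intro s hs
    rw [List.foldl_cons, PySem.Set.add_of_mem (hs a (by simp))]
    exact ih s (fun b hb => hs b (by simp [hb]))

theorem pv_foldl_add_cons {α : Type} [BEq α] [LawfulBEq α] (rest : List α) (x : α)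
    (hx : x ∉ rest) : ∀ s : List α, rest.foldl PySem.Set.add (x :: s) = x :: rest.foldl PySem.Set.add s := by
  induction rest with
  | nil => intro s; rfl
  | cons a t ih =>
    intro s
    have hax : a ≠ x := fun h => hx (by simp [h])
    have ht : x ∉ t := fun h => hx (by simp [h])
    rw [List.foldl_cons, List.foldl_cons]
    by_cases hmem : a ∈ s
    · rw [PySem.Set.add_of_mem hmem, PySem.Set.add_of_mem (by simp [hmem])]
      exact ih ht s
    · rw [PySem.Set.add_of_not_mem hmem, PySem.Set.add_of_not_mem (by simp [hmem, hax])]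
      have := ih ht (s ++ [a])
      simpa using this

theorem pv_ofList_run {α : Type} [BEq α] [LawfulBEq α] (x : α) (run rest : List α)
    (hall : ∀ a ∈ run, a = x) (hx : x ∉ rest) :
    PySem.Set.ofList (x :: (run ++ rest)) = x :: PySem.Set.ofList rest := by
  rw [PySem.Set.ofList_eq_foldl, PySem.Set.ofList_eq_foldl]
  rw [List.foldl_cons, List.foldl_append]
  have h0 : PySem.Set.add [] x = [x] := rfl
  rw [h0, pv_foldl_add_of_subset run [x] (fun a ha => by simp [hall a ha])]
  exact pv_foldl_add_cons rest x hx []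

theorem pv_drop_takeWhile {α : Type} (p : α → Bool) (l : List α) :
    l.drop (l.takeWhile p).length = l.dropWhile p := by
  induction l with
  | nil => simp
  | cons x t ih => by_cases h : p x <;> simp [List.takeWhile, List.dropWhile, h, ih]

theorem pv_dropWhile_head_false {α : Type} (p : α → Bool) (t : List α) (y : α) (ys : List α)
    (h : t.dropWhile p = y :: ys) : p y = false := by
  induction t with
  | nil => simp at h
  | cons a s ih =>
    by_cases hp : p a
    · rw [List.dropWhile_cons_of_pos hp] at h; exact ih h
    · rw [List.dropWhile_cons_of_neg hp] at h
      cases h; simpa using hp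

theorem pv_not_mem_dropWhile {α : Type} [LinearOrder α] [BEq α] [LawfulBEq α] (x : α) (t : List α)
    (hx : ∀ a ∈ t, x ≤ a) (hp : t.Pairwise (· ≤ ·)) :
    x ∉ t.dropWhile (fun y => y == x) := by
  intro hmem
  set rest := t.dropWhile (fun y => y == x) with hr
  have hne : rest ≠ [] := by intro h; rw [h] at hmem; exact absurd hmem (List.not_mem_nil)
  obtain ⟨y, ys, hys⟩ := List.exists_cons_of_ne_nil hne
  have hpy : (y == x) = false := pv_dropWhile_head_false _ t y ys (by rw [← hr, hys])
  have hyx : y ≠ x := by simpa using hpy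
  have hsub : rest.Sublist t := by rw [hr]; exact List.dropWhile_sublist _
  have hyt : y ∈ t := hsub.subset (by rw [hys]; simp)
  have hxy : x ≤ y := hx y hyt
  have hrest_pw : rest.Pairwise (· ≤ ·) := hp.sublist hsub
  have hx_ys : x ∈ ys := by
    have hm : x ∈ y :: ys := by rwa [hys] at hmem
    cases List.mem_cons.1 hm with
    | inl h => exact absurd h.symm hyx
    | inr h => exact h
  have hyx_le : y ≤ x := by
    rw [hys] at hrest_pw
    exact (List.pairwise_cons.1 hrest_pw).1 x hx_ys
  exact hyx (le_antisymm hyx_le hxy)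

theorem pvRunsRec_sorted_aux {α : Type} [LinearOrder α] [BEq α] [LawfulBEq α] :
    ∀ (n : Nat) (l : List α), l.length ≤ n → l.Pairwise (· ≤ ·) →
      pvRunsRec l = (PySem.Set.ofList l).map (fun k => (k, (l.count k : Int))) := by
  intro n
  induction n with
  | zero =>
    intro l hl _
    have : l = [] := List.eq_nil_of_length_eq_zero (Nat.le_zero.1 hl)
    subst this; rw [pvRunsRec]; rfl
  | succ n ih =>
    intro l hl hpw
    match l with
    | [] => rw [pvRunsRec]; rfl
    | x :: t =>
      have hx_le : ∀ a ∈ t, x ≤ a := (List.pairwise_cons.1 hpw).1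
      have ht_pw : t.Pairwise (· ≤ ·) := (List.pairwise_cons.1 hpw).2
      set run := t.takeWhile (fun y => y == x) with hrun
      set rest := t.dropWhile (fun y => y == x) with hrest
      have hsplit : t = run ++ rest := (List.takeWhile_append_dropWhile).symm
      have hall : ∀ a ∈ run, a = x := by
        intro a ha
        have := List.mem_takeWhile_imp ha
        simpa using this
      have hxrest : x ∉ rest := pv_not_mem_dropWhile x t hx_le ht_pw
      have hdrop : t.drop run.length = rest := by rw [hrun, hrest]; exact pv_drop_takeWhile _ t
      have hrest_pw : rest.Pairwise (· ≤ ·) := ht_pw.sublist (List.dropWhile_sublist _)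
      have hrest_len : rest.length ≤ n := by
        have := congrArg List.length hsplit
        simp at this
        have hlen : t.length ≤ n := by simpa using hl
        omega
      rw [pvRunsRec]
      rw [hdrop, ih rest hrest_len hrest_pw]
      have hofl : PySem.Set.ofList (x :: t) = x :: PySem.Set.ofList rest := by
        rw [hsplit]; exact pv_ofList_run x run rest hall hxrest
      rw [hofl]
      have hcx : (x :: t).count x = 1 + run.length := by
        rw [hsplit]
        rw [List.count_cons_self, List.count_append]
        rw [List.count_eq_zero.2 hxrest]
        rw [List.count_eq_length.2 (fun b hb => by simp [hall b hb])]
        omega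
      simp only [List.map_cons, hcx]
      congr 1
      apply List.map_congr_left
      intro k hk
      have hkrest : k ∈ rest := (PySem.Set.mem_ofList _ _).1 hk
      have hkx : k ≠ x := fun h => hxrest (h ▸ hkrest)
      have : (x :: t).count k = rest.count k := by
        rw [hsplit, List.count_cons_of_ne (Ne.symm hkx), List.count_append,
          List.count_eq_zero.2 (fun h => hkx (hall k h)), Nat.zero_add]
      rw [this]

-- A's collecting loop builds (s, spk) = (map of field 2, map of field 1)
theorem pv_pair_foldl (data : List (List String)) :
    data.foldl (fun (acc : List String × List String) line =>
      (acc.1 ++ [PySem.List.pyGetD line 2 ""], acc.2 ++ [PySem.List.pyGetD line 1 ""])) ([], [])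
    = (data.map (fun line => PySem.List.pyGetD line 2 ""), data.map (fun line => PySem.List.pyGetD line 1 "")) := by
  rw [PySem.List.foldl_prod_mk (fun a l => a ++ [PySem.List.pyGetD l 2 ""]) (fun a l => a ++ [PySem.List.pyGetD l 1 ""])]
  simp only [PySem.List.foldl_append_singleton_eq_map, List.nil_append]

-- set() of two permuted lists is a permutation
theorem pv_ofList_perm {α : Type} [BEq α] [LawfulBEq α] {l1 l2 : List α} (h : l1.Perm l2) :
    (PySem.Set.ofList l1).Perm (PySem.Set.ofList l2) := by
  refine (List.perm_ext_iff_of_nodup (PySem.Set.nodup_ofList _) (PySem.Set.nodup_ofList _)).2 ?_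
  intro a
  simp [PySem.Set.mem_ofList, h.mem_iff]

-- the runs of a sorted copy of col, keyed by col's counts
theorem pv_runs_sorted {α : Type} [LinearOrder α] [BEq α] [LawfulBEq α] (col : List α) :
    pvRuns (PySem.List.sorted col (fun x => x) false) 0
      = (PySem.Set.ofList (PySem.List.sorted col (fun x => x) false)).map
          (fun k => (k, (col.count k : Int))) := by
  rw [pvRuns_eq_rec, List.drop_zero]
  rw [pvRunsRec_sorted_aux (PySem.List.sorted col (fun x => x) false).length _ le_rfl
    (PySem.List.sorted_pairwise col (fun x => x))]
  apply List.map_congr_left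
  intro k _
  rw [(PySem.List.sorted_perm col (fun x => x) false).count_eq]

-- unique count: number of runs = len(set(col))
theorem pv_col_n {α : Type} [LinearOrder α] [BEq α] [LawfulBEq α] (col : List α) :
    (pvRuns (PySem.List.sorted col (fun x => x) false) 0).length
      = (PySem.Set.ofList col).length := by
  rw [pv_runs_sorted, List.length_map]
  exact (pv_ofList_perm (PySem.List.sorted_perm col (fun x => x) false)).length_eq

-- frequency table: runs of the sorted run lengths = Counter(sorted(Counter(col).values())).items()
theorem pv_col_loop {α : Type} [LinearOrder α] [BEq α] [LawfulBEq α] (col : List α) :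
    pvRuns (PySem.List.sorted ((pvRuns (PySem.List.sorted col (fun x => x) false) 0).map Prod.snd)
        (fun x => x) false) 0
      = (PySem.Dict.counter (PySem.List.sorted (PySem.Dict.counter col).values (fun v => v) false)).items := by
  have h1 : (pvRuns (PySem.List.sorted col (fun x => x) false) 0).map Prod.snd
      = (PySem.Set.ofList (PySem.List.sorted col (fun x => x) false)).map
          (fun k => (col.count k : Int)) := by
    rw [pv_runs_sorted, List.map_map]
    rfl
  have h2 : (PySem.Dict.counter col).values
      = (PySem.Set.ofList col).map (fun k => (col.count k : Int)) := by
    show ((PySem.Dict.counter col).items).map Prod.snd = _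
    rw [PySem.Dict.items_counter, List.map_map]
    rfl
  have hperm : ((pvRuns (PySem.List.sorted col (fun x => x) false) 0).map Prod.snd).Perm
      (PySem.Dict.counter col).values := by
    rw [h1, h2]
    exact (pv_ofList_perm (PySem.List.sorted_perm col (fun x => x) false)).map _
  rw [PySem.List.sorted_eq_sorted_of_perm _ _ _ (fun a b h => h) hperm]
  rw [pvRuns_eq_rec, List.drop_zero]
  rw [pvRunsRec_sorted_aux (PySem.List.sorted (PySem.Dict.counter col).values (fun v => v) false).length _
    le_rfl (PySem.List.sorted_pairwise _ _)]
  rw [PySem.Dict.items_counter]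

-- ===== VERDICT (by name: the statement is the Claim_ definition above) =====
theorem get_general_stats_spec : Claim_equal_get_general_stats := by
  intro data _hdom _hpre
  unfold Spec_get_general_stats get_general_stats get_general_stats_alt
  simp only [pv_pair_foldl, pv_col_n, pv_col_loop]
  rw [String.append_empty]
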